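-- pv_equiv track=rewrite | github.com/brownbreeze/StudyCodingTest | codility/lesson_8_Dominator/solution.py | solution
-- ===== SOURCE A (Python) =====
-- def solution(A):
--     B = A.copy()
--     B.sort()
--     dom = B[len(B)//2]
--     if B.count(dom) < int(len(B)//2):
--         return -1
--     for i in range(len(A)):
--         if A[i]==dom:
--             return i
--     return -1
-- ===== SOURCE B (Python) =====
-- def _select(xs, k):
--     # k-th smallest (0-based) via quickselect, middle element as pivot
--     while True:
--         p = xs[len(xs) // 2]
--         lt = [x for x in xs if x < p]
--         if k < len(lt):
--             xs = lt
--             continue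
--         eq = [x for x in xs if x == p]
--         if k < len(lt) + len(eq):
--             return p
--         k -= len(lt) + len(eq)
--         xs = [x for x in xs if x > p]
--
--
-- def solution(A):
--     k = len(A) // 2
--     dom = _select(A, k)
--     cnt = 0
--     first = -1
--     for i, x in enumerate(A):
--         if x == dom:
--             cnt += 1
--             if first < 0:
--                 first = i
--     return first if cnt >= k else -1
-- ===== Notes on version B (the rewrite author's own statement) =====
-- stated objective: alternative
-- what changed: B replaces A's full sort (taken only to read the median) and its two extra passes (list.count plus an index scan) by a quickselect for the n//2-th order statistic and a single combined count-and-first-index pass.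
-- outside the precondition, e.g. on solution([]): A raises IndexError, B raises IndexError
import Mathlib
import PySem

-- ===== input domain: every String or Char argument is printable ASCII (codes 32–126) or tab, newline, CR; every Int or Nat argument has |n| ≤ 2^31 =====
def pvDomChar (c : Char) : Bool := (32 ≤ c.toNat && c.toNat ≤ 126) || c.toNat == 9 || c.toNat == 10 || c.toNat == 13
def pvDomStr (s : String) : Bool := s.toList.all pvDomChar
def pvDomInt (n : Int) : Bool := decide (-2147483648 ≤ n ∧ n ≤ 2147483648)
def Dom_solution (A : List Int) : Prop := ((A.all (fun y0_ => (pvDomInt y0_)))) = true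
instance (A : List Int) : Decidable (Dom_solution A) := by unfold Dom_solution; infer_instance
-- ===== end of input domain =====

-- B replaces A's sort-based median by a quickselect for the n//2-th order statistic plus one
-- combined count/first-index pass; equivalence is proved for nonempty lists (A raises IndexError on []).

-- ===== PORT A =====
-- 'for i in range(len(A)): if A[i]==dom: return i' / trailing 'return -1'
def solFind (dom : Int) : List Int → Int → Int
  | [], _ => -1
  | x :: xs, i => if x = dom then i else solFind dom xs (i + 1)

def solution (A : List Int) : Int :=
  let B := PySem.List.sorted A (fun x => x) false
  match PySem.List.pyGet? B ((B.length / 2 : Nat) : Int) with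
  | none => 0   -- B[len(B)//2] raises IndexError here (empty list); excluded by Pre_solution
  | some dom =>
    if B.count dom < B.length / 2 then -1
    else solFind dom A 0

-- ===== PORT B =====
-- quickselect (_select in Source B; the while loop becomes recursion on the shrinking list);
-- '[]' case is Source B's xs[0] IndexError, unreachable from solution_alt on a nonempty list
def selB : List Int → Nat → Int
  | [], _ => 0
  | x :: rest, k =>
    let p := (x :: rest).getD ((x :: rest).length / 2) 0
    let lt := (x :: rest).filter (fun a => decide (a < p))
    if k < lt.length then selB lt k
    else
      let eq := (x :: rest).filter (fun a => a == p)
      if k < lt.length + eq.length then p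
      else selB ((x :: rest).filter (fun a => decide (p < a))) (k - lt.length - eq.length)
termination_by xs _ => xs.length
decreasing_by
  all_goals
    have hp : (x :: rest).getD ((x :: rest).length / 2) 0 ∈ x :: rest := by
      rw [List.getD_eq_getElem _ _ (by simp; omega)]
      exact List.getElem_mem _
  · rw [← List.countP_eq_length_filter]
    exact List.countP_lt_length_iff.2 ⟨_, hp, by simp⟩
  · rw [← List.countP_eq_length_filter]
    exact List.countP_lt_length_iff.2 ⟨_, hp, by simp⟩

-- the single 'for i, x in enumerate(A)' pass of Source B: state (cnt, first)
def cfLoop (dom : Int) : List Int → Int → Int → Int → Int × Int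
  | [], _, cnt, first => (cnt, first)
  | x :: xs, i, cnt, first =>
    if x = dom then cfLoop dom xs (i + 1) (cnt + 1) (if first < 0 then i else first)
    else cfLoop dom xs (i + 1) cnt first

def solution_alt (A : List Int) : Int :=
  let k := A.length / 2
  let dom := selB A k
  let r := cfLoop dom A 0 0 (-1)
  if (k : Int) ≤ r.1 then r.2 else -1

-- ===== PRECONDITION & SPEC =====
-- Pre_ excludes only the empty list, on which A raises IndexError at B[len(B)//2].
def Pre_solution (A : List Int) : Prop := A ≠ []
instance (A : List Int) : Decidable (Pre_solution A) := by unfold Pre_solution; infer_instance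
def pvWitness_solution : List Int := [3, 4, 3, 2, 3, -1, 3, 3]

def Spec_solution (A : List Int) (out : Int) : Prop := out = solution_alt A
instance (A : List Int) (out : Int) : Decidable (Spec_solution A out) := by unfold Spec_solution; infer_instance

-- ===== CLAIM (what is proved, stated in full; the proofs are below) =====
def Claim_equal_solution : Prop := ∀ (A : List Int), Dom_solution A → Pre_solution A → Spec_solution A (solution A)

-- ===== LEMMAS AND PROOFS =====

-- count of a value in a filtered list
lemma count_filter_eq (q : Int → Bool) (l : List Int) (a : Int) :
    (l.filter q).count a = if q a then l.count a else 0 := by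
  by_cases hq : q a
  · simp [List.count_filter hq, hq]
  · simp only [hq, Bool.false_eq_true, if_false]
    rw [List.count_eq_zero]
    intro hm
    exact hq ((List.mem_filter.1 hm).2)

-- the three-way filter partition is a permutation of the list
lemma filter_perm3 (p : Int) (l : List Int) :
    (l.filter (fun x => decide (x < p)) ++ l.filter (fun x => x == p) ++
      l.filter (fun x => decide (p < x))).Perm l := by
  refine List.perm_iff_count.2 (fun a => ?_)
  simp only [List.count_append, count_filter_eq]
  rcases lt_trichotomy a p with h | h | h
  · simp [h, not_lt.2 h.le, beq_iff_eq, ne_of_lt h]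
  · subst h; simp
  · simp [h, not_lt.2 h.le, beq_iff_eq, ne_of_gt h]

-- sorted(xs) decomposes along any pivot's partition
lemma sorted_decomp (p : Int) (l : List Int) :
    PySem.List.sorted l (fun x => x) false =
      PySem.List.sorted (l.filter (fun x => decide (x < p))) (fun x => x) false ++
      l.filter (fun x => x == p) ++
      PySem.List.sorted (l.filter (fun x => decide (p < x))) (fun x => x) false := by
  set L := PySem.List.sorted (l.filter (fun x => decide (x < p))) (fun x => x) false with hL
  set E := l.filter (fun x => x == p) with hE
  set G := PySem.List.sorted (l.filter (fun x => decide (p < x))) (fun x => x) false with hG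
  have hLm : ∀ a ∈ L, a < p := by
    intro a ha
    have := (PySem.List.mem_sorted _ _ _ _).1 ha
    simpa using (List.mem_filter.1 this).2
  have hEm : ∀ a ∈ E, a = p := by
    intro a ha
    simpa using (List.mem_filter.1 ha).2
  have hGm : ∀ a ∈ G, p < a := by
    intro a ha
    have := (PySem.List.mem_sorted _ _ _ _).1 ha
    simpa using (List.mem_filter.1 this).2
  have hperm : (L ++ E ++ G).Perm l := by
    refine List.Perm.trans ?_ (filter_perm3 p l)
    exact ((PySem.List.sorted_perm _ _ _).append_right _).append
      (PySem.List.sorted_perm _ _ _)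
  have hpair : (L ++ E ++ G).Pairwise (fun x1 x2 => x1 ≤ x2) := by
    refine List.pairwise_append.2 ⟨List.pairwise_append.2 ⟨?_, ?_, ?_⟩, ?_, ?_⟩
    · simpa using PySem.List.sorted_pairwise (xs := l.filter (fun x => decide (x < p)))
        (key := fun x => x) (α := Int) (κ := Int)
    · exact List.pairwise_of_forall_mem_list
        (fun a ha b hb => le_of_eq ((hEm a ha).trans (hEm b hb).symm))
    · exact fun a ha b hb => le_of_lt (lt_of_lt_of_eq (hLm a ha) (hEm b hb).symm)
    · simpa using PySem.List.sorted_pairwise (xs := l.filter (fun x => decide (p < x)))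
        (key := fun x => x) (α := Int) (κ := Int)
    · intro a ha b hb
      rcases List.mem_append.1 ha with h | h
      · exact le_of_lt (lt_trans (hLm a h) (hGm b hb))
      · exact le_of_lt (lt_of_eq_of_lt (hEm a h) (hGm b hb))
  exact PySem.List.sorted_id_eq_of_perm_of_pairwise l (L ++ E ++ G) hperm hpair

-- quickselect computes sorted(xs)[k]
-- indexing the three-block concatenation
lemma getElem3_left (L E G : List Int) (k : Nat) (h : k < L.length) :
    (L ++ E ++ G)[k]? = L[k]? := by
  rw [List.append_assoc, List.getElem?_append_left h]

lemma getElem3_mid (L E G : List Int) (k : Nat) (p : Int)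
    (h1 : L.length ≤ k) (h2 : k < L.length + E.length) (hE : ∀ a ∈ E, a = p) :
    (L ++ E ++ G)[k]? = some p := by
  rw [List.append_assoc, List.getElem?_append_right h1,
    List.getElem?_append_left (by omega), List.getElem?_eq_getElem (by omega)]
  exact congrArg some (hE _ (List.getElem_mem _))

lemma getElem3_right (L E G : List Int) (k : Nat) (h : L.length + E.length ≤ k) :
    (L ++ E ++ G)[k]? = G[k - L.length - E.length]? := by
  rw [List.append_assoc, List.getElem?_append_right (by omega),
    List.getElem?_append_right (by omega)]

lemma selB_correct (xs : List Int) (k : Nat) : k < xs.length →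
    (PySem.List.sorted xs (fun x => x) false)[k]? = some (selB xs k) := by
  induction xs, k using selB.induct with
  | case1 k => intro hk; simp at hk
  | case2 x rest k p lt hlt ih =>
    intro hk
    have h1 : k < ((x :: rest).filter
        (fun a => decide (a < (x :: rest).getD ((x :: rest).length / 2) 0))).length := hlt
    rw [sorted_decomp ((x :: rest).getD ((x :: rest).length / 2) 0), selB]
    simp only [h1, if_true]
    have hLlen : (PySem.List.sorted ((x :: rest).filter
        (fun a => decide (a < (x :: rest).getD ((x :: rest).length / 2) 0)))
        (fun x => x) false).length = ((x :: rest).filter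
        (fun a => decide (a < (x :: rest).getD ((x :: rest).length / 2) 0))).length :=
      PySem.List.length_sorted _ _ _
    rw [getElem3_left _ _ _ _ (by omega)]
    exact ih hlt
  | case3 x rest k p lt hlt eq hle =>
    intro hk
    have h1 : ¬ k < ((x :: rest).filter
        (fun a => decide (a < (x :: rest).getD ((x :: rest).length / 2) 0))).length := hlt
    have h2 : k < ((x :: rest).filter
        (fun a => decide (a < (x :: rest).getD ((x :: rest).length / 2) 0))).length
        + ((x :: rest).filter (fun a => a == (x :: rest).getD ((x :: rest).length / 2) 0)).length := hle
    rw [sorted_decomp ((x :: rest).getD ((x :: rest).length / 2) 0), selB]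
    simp only [h1, h2, if_true, if_false]
    have hLlen : (PySem.List.sorted ((x :: rest).filter
        (fun a => decide (a < (x :: rest).getD ((x :: rest).length / 2) 0)))
        (fun x => x) false).length = ((x :: rest).filter
        (fun a => decide (a < (x :: rest).getD ((x :: rest).length / 2) 0))).length :=
      PySem.List.length_sorted _ _ _
    refine getElem3_mid _ _ _ _ _ (by omega) (by omega) ?_
    intro a ha
    simpa using (List.mem_filter.1 ha).2
  | case4 x rest k p lt hlt eq hle ih =>
    intro hk
    have h1 : ¬ k < ((x :: rest).filter
        (fun a => decide (a < (x :: rest).getD ((x :: rest).length / 2) 0))).length := hlt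
    have h2 : ¬ k < ((x :: rest).filter
        (fun a => decide (a < (x :: rest).getD ((x :: rest).length / 2) 0))).length
        + ((x :: rest).filter (fun a => a == (x :: rest).getD ((x :: rest).length / 2) 0)).length := hle
    rw [sorted_decomp ((x :: rest).getD ((x :: rest).length / 2) 0), selB]
    simp only [h1, h2, if_false]
    have hLlen : (PySem.List.sorted ((x :: rest).filter
        (fun a => decide (a < (x :: rest).getD ((x :: rest).length / 2) 0)))
        (fun x => x) false).length = ((x :: rest).filter
        (fun a => decide (a < (x :: rest).getD ((x :: rest).length / 2) 0))).length :=
      PySem.List.length_sorted _ _ _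
    have hpart : ((x :: rest).filter
        (fun a => decide (a < (x :: rest).getD ((x :: rest).length / 2) 0))).length
        + ((x :: rest).filter (fun a => a == (x :: rest).getD ((x :: rest).length / 2) 0)).length
        + ((x :: rest).filter (fun a => decide ((x :: rest).getD ((x :: rest).length / 2) 0 < a))).length
        = (x :: rest).length := by
      have := (filter_perm3 ((x :: rest).getD ((x :: rest).length / 2) 0) (x :: rest)).length_eq
      simp only [List.length_append] at this
      omega
    have hk' : k - ((x :: rest).filter
        (fun a => decide (a < (x :: rest).getD ((x :: rest).length / 2) 0))).length
        - ((x :: rest).filter (fun a => a == (x :: rest).getD ((x :: rest).length / 2) 0)).length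
        < ((x :: rest).filter
        (fun a => decide ((x :: rest).getD ((x :: rest).length / 2) 0 < a))).length := by omega
    rw [getElem3_right _ _ _ _ (by omega), hLlen]
    exact ih hk'

-- the combined pass of Source B: first component counts, second is the first index
lemma cfLoop_spec (dom : Int) : ∀ (xs : List Int) (i cnt first : Int), 0 ≤ i →
    (first < 0 → first = -1) →
    cfLoop dom xs i cnt first =
      (cnt + (xs.count dom : Int), if first < 0 then solFind dom xs i else first) := by
  intro xs
  induction xs with
  | nil =>
    intro i cnt first hi hneg
    simp only [cfLoop, solFind]
    by_cases hf : first < 0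
    · simp [hneg hf]
    · simp [hf]
  | cons x xs ih =>
    intro i cnt first hi hneg
    by_cases hx : x = dom
    · subst hx
      have hcnt : (x :: xs).count x = xs.count x + 1 := by simp
      by_cases hf : first < 0
      · rw [cfLoop, if_pos rfl, if_pos hf, ih _ _ _ (by omega) (by omega)]
        refine Prod.ext ?_ ?_
        · simp only [hcnt]; push_cast; ring
        · simp only [hf, if_true, if_neg (by omega : ¬ i < 0), solFind]
      · rw [cfLoop, if_pos rfl, if_neg hf, ih _ _ _ (by omega) hneg]
        refine Prod.ext ?_ ?_
        · simp only [hcnt]; push_cast; ring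
        · simp only [hf, if_false]
    · rw [cfLoop, if_neg hx, ih _ _ _ (by omega) hneg]
      have hxd : (dom == x) = false := by
        simp only [beq_eq_false_iff_ne, ne_eq]
        exact fun h => hx h.symm
      have hc : (x :: xs).count dom = xs.count dom := by
        simp [List.count_cons]; omega
      refine Prod.ext ?_ ?_
      · simp [hc]
      · simp only [solFind, if_neg hx]

-- ===== VERDICT (by name: the statement is the Claim_ definition above) =====
theorem solution_spec : Claim_equal_solution := by
  intro A _ hpre
  unfold Spec_solution solution solution_alt
  obtain ⟨p, rest, rfl⟩ : ∃ p rest, A = p :: rest := by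
    cases A with
    | nil => exact absurd rfl hpre
    | cons p rest => exact ⟨p, rest, rfl⟩
  have hlen : (PySem.List.sorted (p :: rest) (fun x => x) false).length
      = (p :: rest).length := PySem.List.length_sorted _ _ _
  have hk : (p :: rest).length / 2 < (p :: rest).length := by
    simp only [List.length_cons]; omega
  have hget := selB_correct (p :: rest) ((p :: rest).length / 2) hk
  simp only [hlen, PySem.List.pyGet?_natCast, hget]
  set dom := selB (p :: rest) ((p :: rest).length / 2) with hdom
  have hcount : (PySem.List.sorted (p :: rest) (fun x => x) false).count dom
      = (p :: rest).count dom := (PySem.List.sorted_perm _ _ _).count_eq dom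
  rw [cfLoop_spec dom (p :: rest) 0 0 (-1) le_rfl (fun _ => rfl)]
  simp only [hcount, if_pos (show (-1 : Int) < 0 by omega)]
  split_ifs with h1 h2 h2
  · exfalso
    have : ((p :: rest).count dom : Int) < ((p :: rest).length / 2 : Nat) := by exact_mod_cast Nat.cast_lt.2 h1
    omega
  · rfl
  · rfl
  · exfalso
    have hge : ¬ ((p :: rest).count dom < (p :: rest).length / 2) := h1
    have : (((p :: rest).length / 2 : Nat) : Int) ≤ ((p :: rest).count dom : Int) := by
      exact_mod_cast Nat.not_lt.1 hge
    omega
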